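-- pv_equiv track=rewrite | github.com/JuanLopezAranzazu/advent-of-code-2025 | day10/py/solution.py | patterns
-- ===== SOURCE A (Python) =====
-- from itertools import combinations, product
--
-- def patterns(coeffs):
--     m = len(coeffs)
--     n = len(coeffs[0])
--     out = {p: {} for p in product(range(2), repeat=n)}
--
--     for k in range(m + 1):
--         for combo in combinations(range(m), k):
--             pattern = [0] * n
--             for i in combo:
--                 for j in range(n):
--                     pattern[j] += coeffs[i][j]
--             pattern = tuple(pattern)
--             parity = tuple(x % 2 for x in pattern)
--             out[parity].setdefault(pattern, k)
--
--     return out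
-- ===== SOURCE B (Python) =====
-- from itertools import product
--
-- def patterns(coeffs):
--     m = len(coeffs)
--     n = len(coeffs[0])
--
--     def dfs(rows, k, vec):
--         if not rows:
--             return [(tuple(vec), k)]
--         incl = dfs(rows[1:], k + 1, [a + b for a, b in zip(vec, rows[0])])
--         return incl + dfs(rows[1:], k, vec)
--
--     pairs = dfs(coeffs, 0, [0] * n)
--     out = {q: {} for q in product(range(2), repeat=n)}
--     for k in range(m + 1):
--         for pat, j in pairs:
--             if j == k:
--                 out[tuple(x % 2 for x in pat)].setdefault(pat, k)
--     return out
-- ===== Notes on version B (the rewrite author's own statement) =====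
-- stated objective: alternative
-- what changed: A rebuilds every subset's sum vector from scratch for each combination (and re-enumerates combinations per size k); B enumerates all subsets once by an include/exclude DFS that extends a running sum vector, then buckets the resulting (pattern, size) pairs by size, which reproduces A's (size, lexicographic) insertion order.
import Mathlib
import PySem

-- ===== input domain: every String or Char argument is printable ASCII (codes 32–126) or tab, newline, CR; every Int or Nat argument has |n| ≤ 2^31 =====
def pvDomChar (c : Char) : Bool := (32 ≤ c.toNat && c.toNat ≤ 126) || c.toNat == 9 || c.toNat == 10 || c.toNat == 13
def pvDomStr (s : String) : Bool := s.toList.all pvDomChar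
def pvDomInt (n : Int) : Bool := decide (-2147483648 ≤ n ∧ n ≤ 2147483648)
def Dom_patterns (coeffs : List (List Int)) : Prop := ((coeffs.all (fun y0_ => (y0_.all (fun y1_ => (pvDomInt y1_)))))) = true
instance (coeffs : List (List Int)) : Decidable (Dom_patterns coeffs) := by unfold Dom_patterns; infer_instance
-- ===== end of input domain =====

-- B replaces A's per-subset recomputation of sums (rebuild each combination's vector from scratch)
-- by one include/exclude DFS that extends a running sum vector once per subset (objective: alternative).

-- itertools.product(range(2), repeat=n), used by both Pythons for the outer dict's keys
def pyProduct01 : Nat → List (List Int)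
  | 0 => [[]]
  | n + 1 => ([0, 1] : List Int).flatMap (fun b => (pyProduct01 n).map (b :: ·))

-- ===== PORT A =====
def patterns (coeffs : List (List Int)) : List (List Int × List (List Int × Int)) :=
  let m : Int := PySem.List.len coeffs
  let n : Int := PySem.List.len (PySem.List.pyGetD coeffs 0 [])
  let init : PySem.Dict (List Int) (PySem.Dict (List Int) Int) :=
    (pyProduct01 n.toNat).foldl (fun d p => d.insert p PySem.Dict.empty) PySem.Dict.empty
  let final :=
    (PySem.List.pyRange 0 (m + 1) 1).foldl (fun out k =>
      (PySem.List.combinations (PySem.List.pyRange 0 m 1) k.toNat).foldl (fun out combo =>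
        let pattern := combo.foldl (fun pat i =>
          (PySem.List.pyRange 0 n 1).foldl (fun pat j =>
            PySem.List.pySetD pat j
              (PySem.List.pyGetD pat j 0 + PySem.List.pyGetD (PySem.List.pyGetD coeffs i []) j 0)) pat)
          (PySem.List.pyRepeat [(0 : Int)] n)
        let parity := pattern.map (fun x => PySem.Int.mod x 2)
        out.modify parity PySem.Dict.empty (fun d => d.setdefault pattern k)) out) init
  final.items.map (fun p => (p.1, p.2.items))

-- ===== PORT B =====
-- the recursive dfs of Source B (structural recursion on the remaining rows)
def dfsB : List (List Int) → Int → List Int → List (List Int × Int)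
  | [], k, vec => [(vec, k)]
  | row :: rest, k, vec =>
      dfsB rest (k + 1) (List.zipWith (· + ·) vec row) ++ dfsB rest k vec

def patterns_alt (coeffs : List (List Int)) : List (List Int × List (List Int × Int)) :=
  let m : Int := PySem.List.len coeffs
  let n : Int := PySem.List.len (PySem.List.pyGetD coeffs 0 [])
  let pairs := dfsB coeffs 0 (PySem.List.pyRepeat [(0 : Int)] n)
  let out : PySem.Dict (List Int) (PySem.Dict (List Int) Int) :=
    (pyProduct01 n.toNat).foldl (fun d p => d.insert p PySem.Dict.empty) PySem.Dict.empty
  let final :=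
    (PySem.List.pyRange 0 (m + 1) 1).foldl (fun out k =>
      pairs.foldl (fun out pj =>
        if pj.2 == k then
          out.modify (pj.1.map (fun x => PySem.Int.mod x 2)) PySem.Dict.empty
            (fun d => d.setdefault pj.1 k)
        else out) out) out
  final.items.map (fun p => (p.1, p.2.items))

-- ===== PRECONDITION & SPEC =====
-- Pre_ excludes exactly the inputs on which A raises: the empty list (coeffs[0] is an
-- IndexError) and rows shorter than the first row (coeffs[i][j] is an IndexError).
def Pre_patterns (coeffs : List (List Int)) : Prop :=
  coeffs ≠ [] ∧ ∀ row ∈ coeffs, (coeffs.headD []).length ≤ row.length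
instance (coeffs : List (List Int)) : Decidable (Pre_patterns coeffs) := by
  unfold Pre_patterns; infer_instance

def pvWitness_patterns : List (List Int) := [[1, 2], [3, -4], [1, 0]]

def Spec_patterns (coeffs : List (List Int)) (out : List (List Int × List (List Int × Int))) : Prop := out = patterns_alt coeffs
instance (coeffs : List (List Int)) (out : List (List Int × List (List Int × Int))) : Decidable (Spec_patterns coeffs out) := by unfold Spec_patterns; infer_instance

-- ===== CLAIM (what is proved, stated in full; the proofs are below) =====
def Claim_equal_patterns : Prop := ∀ (coeffs : List (List Int)), Dom_patterns coeffs → Pre_patterns coeffs → Spec_patterns coeffs (patterns coeffs)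

-- ===== LEMMAS AND PROOFS =====

-- level function: Lv rows k vec = the sum vectors of the size-k subsets of rows (added onto
-- vec), in lexicographic order of the chosen index sets
def Lv : List (List Int) → Nat → List Int → List (List Int)
  | _, 0, vec => [vec]
  | [], _ + 1, _ => []
  | row :: rest, k + 1, vec =>
      Lv rest k (List.zipWith (· + ·) vec row) ++ Lv rest (k + 1) vec

theorem dfsB_key_ge (rows : List (List Int)) : ∀ (k0 : Int) (vec : List Int),
    ∀ pj ∈ dfsB rows k0 vec, k0 ≤ pj.2 := by
  induction rows with
  | nil => intro k0 vec pj h; simp [dfsB] at h; simp [h]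
  | cons row rest ih =>
    intro k0 vec pj h
    simp only [dfsB, List.mem_append] at h
    rcases h with h | h
    · have := ih (k0 + 1) _ pj h; omega
    · exact ih k0 _ pj h

theorem dfsB_filter_eq (rows : List (List Int)) : ∀ (k0 : Int) (k : Nat) (vec : List Int),
    (dfsB rows k0 vec).filter (fun pj => pj.2 == k0 + (k : Int))
      = (Lv rows k vec).map (fun p => (p, k0 + (k : Int))) := by
  induction rows with
  | nil =>
    intro k0 k vec
    cases k with
    | zero => simp [dfsB, Lv]
    | succ k => simp [dfsB, Lv]; omega
  | cons row rest ih =>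
    intro k0 k vec
    simp only [dfsB, List.filter_append]
    cases k with
    | zero =>
      have h1 : (dfsB rest (k0 + 1) (List.zipWith (· + ·) vec row)).filter
          (fun pj => pj.2 == k0 + ((0 : Nat) : Int)) = [] := by
        rw [List.filter_eq_nil_iff]
        intro pj hpj
        have := dfsB_key_ge rest (k0 + 1) _ pj hpj
        simp; omega
      rw [h1]
      have h2 := ih k0 0 vec
      simp only [Lv] at *
      simpa using h2
    | succ k =>
      have e : (k0 + 1) + (k : Int) = k0 + ((k + 1 : Nat) : Int) := by push_cast; ring
      have h1 : (dfsB rest (k0 + 1) (List.zipWith (· + ·) vec row)).filter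
            (fun pj => pj.2 == k0 + ((k + 1 : Nat) : Int))
          = (dfsB rest (k0 + 1) (List.zipWith (· + ·) vec row)).filter
            (fun pj => pj.2 == (k0 + 1) + (k : Int)) := by
        apply List.filter_congr; intro pj _; rw [e]
      rw [h1, ih (k0 + 1) k _, ih k0 (k + 1) vec]
      simp only [Lv, List.map_append, e]
theorem combs_map_eq (rows : List (List Int)) : ∀ (k : Nat) (vec : List Int),
    (PySem.List.combinations rows k).map
        (fun rc => rc.foldl (fun p r => List.zipWith (· + ·) p r) vec)
      = Lv rows k vec := by
  induction rows with
  | nil =>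
    intro k vec
    cases k with
    | zero => simp [PySem.List.combinations_zero, Lv]
    | succ k => simp [PySem.List.combinations_nil_succ, Lv]
  | cons row rest ih =>
    intro k vec
    cases k with
    | zero => simp [PySem.List.combinations_zero, Lv]
    | succ k =>
      rw [PySem.List.combinations_cons_succ]
      simp only [List.map_append, List.map_map, Lv]
      rw [ih (k + 1) vec]
      congr 1
      rw [← ih k (List.zipWith (· + ·) vec row)]
      apply List.map_congr_left
      intro c _
      simp [List.foldl_cons]

theorem setfold_gen (row : List Int) : ∀ (N : Nat) (pat : List Int), N ≤ pat.length → N ≤ row.length →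
    (List.range N).foldl (fun p j => p.set j (p.getD j 0 + row.getD j 0)) pat
      = List.zipWith (· + ·) (pat.take N) (row.take N) ++ pat.drop N := by
  intro N
  induction N with
  | zero => simp
  | succ N ih =>
    intro pat hp hr
    rw [List.range_succ, List.foldl_append, ih pat (by omega) (by omega)]
    simp only [List.foldl_cons, List.foldl_nil]
    have hlen : (List.zipWith (· + ·) (pat.take N) (row.take N)).length = N := by
      rw [List.length_zipWith]; simp; omega
    have hdrop : pat.drop N = pat[N] :: pat.drop (N + 1) := List.drop_eq_getElem_cons (by omega)
    have hget : (List.zipWith (· + ·) (pat.take N) (row.take N) ++ pat.drop N).getD N 0 = pat[N] := by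
      rw [List.getD_eq_getElem?_getD, List.getElem?_append_right (by omega), hlen]
      rw [Nat.sub_self, hdrop]
      rfl
    have hrg : row.getD N 0 = row[N] := by
      rw [List.getD_eq_getElem?_getD, List.getElem?_eq_getElem (by omega)]; rfl
    have hset : (List.zipWith (· + ·) (pat.take N) (row.take N) ++ pat.drop N).set N
          (pat[N] + row[N])
        = List.zipWith (· + ·) (pat.take N) (row.take N)
            ++ (pat[N] + row[N]) :: pat.drop (N + 1) := by
      rw [List.set_append_right _ _ (by omega), hlen, Nat.sub_self, hdrop]
      rw [List.set_cons_zero]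
    rw [hget, hrg, hset]
    rw [List.take_add_one, List.take_add_one]
    rw [List.zipWith_append (by rw [List.length_take, List.length_take]; omega)]
    have h1 : pat[N]? = some pat[N] := List.getElem?_eq_getElem (by omega)
    have h2 : row[N]? = some row[N] := List.getElem?_eq_getElem (by omega)
    simp [h1, h2]

theorem zipWith_take_right : ∀ (pat row : List Int),
    List.zipWith (· + ·) pat (row.take pat.length) = List.zipWith (· + ·) pat row
  | [], _ => by simp
  | _ :: _, [] => by simp
  | a :: pat, b :: row => by simp [zipWith_take_right pat row]

theorem setfold (pat row : List Int) (h : pat.length ≤ row.length) :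
    (List.range pat.length).foldl (fun p j => p.set j (p.getD j 0 + row.getD j 0)) pat
      = List.zipWith (· + ·) pat row := by
  rw [setfold_gen row pat.length pat le_rfl h]
  rw [List.take_of_length_le le_rfl, List.drop_of_length_le le_rfl, List.append_nil]
  exact zipWith_take_right pat row

theorem pyfold_inner (N : Nat) (pat row : List Int) (hp : pat.length = N) (hr : N ≤ row.length) :
    (PySem.List.pyRange 0 (N : Int) 1).foldl (fun p j =>
        PySem.List.pySetD p j (PySem.List.pyGetD p j 0 + PySem.List.pyGetD row j 0)) pat
      = List.zipWith (· + ·) pat row := by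
  rw [PySem.List.pyRange_zero_nat, List.foldl_map]
  simp only [PySem.List.pySetD_natCast, PySem.List.pyGetD_natCast]
  subst hp
  exact setfold pat row hr

theorem foldA_eq_zip (N : Nat) : ∀ (rc : List (List Int)) (pat : List Int),
    pat.length = N → (∀ r ∈ rc, N ≤ r.length) →
    rc.foldl (fun p r => (PySem.List.pyRange 0 (N : Int) 1).foldl (fun p j =>
        PySem.List.pySetD p j (PySem.List.pyGetD p j 0 + PySem.List.pyGetD r j 0)) p) pat
      = rc.foldl (fun p r => List.zipWith (· + ·) p r) pat := by
  intro rc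
  induction rc with
  | nil => intro pat _ _; rfl
  | cons r rest ih =>
    intro pat hp hr
    simp only [List.foldl_cons]
    rw [pyfold_inner N pat r hp (hr r (by simp))]
    refine ih _ ?_ (fun r' h' => hr r' (by simp [h']))
    rw [List.length_zipWith, hp]
    have := hr r (by simp)
    omega


-- ===== VERDICT (by name: the statement is the Claim_ definition above) =====
theorem patterns_spec : Claim_equal_patterns := by
  intro coeffs _hdom hpre
  obtain ⟨hne, hlen⟩ := hpre
  unfold Spec_patterns
  simp only [patterns, patterns_alt]
  have hn : PySem.List.len (PySem.List.pyGetD coeffs 0 []) = (((coeffs.headD []).length : Nat) : Int) := by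
    cases coeffs with
    | nil => exact absurd rfl hne
    | cons c cs => simp [PySem.List.pyGetD_zero_cons, PySem.List.len_eq]
  set N := (coeffs.headD []).length with hN
  rw [hn]
  simp only [PySem.List.len_eq, PySem.List.pyRepeat_singleton, Int.toNat_natCast]
  refine congrArg _ (congrArg _ ?_)
  apply PySem.List.foldl_congr_mem
  intro out k hk
  obtain ⟨hk0, hk1⟩ := PySem.List.mem_pyRange_one.mp hk
  obtain ⟨K, rfl⟩ : ∃ K : Nat, k = (K : Int) := ⟨k.toNat, by omega⟩
  -- A side to Lv
  have hmapA : (PySem.List.combinations (PySem.List.pyRange 0 ((coeffs.length : Nat) : Int) 1) K).map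
      (fun c => c.foldl (fun pat i => (PySem.List.pyRange 0 ((N : Nat) : Int) 1).foldl (fun pat j =>
          PySem.List.pySetD pat j
            (PySem.List.pyGetD pat j 0 + PySem.List.pyGetD (PySem.List.pyGetD coeffs i []) j 0)) pat)
        (List.replicate N (0 : Int)))
      = Lv coeffs K (List.replicate N 0) := by
    have hco : coeffs = (PySem.List.pyRange 0 ((coeffs.length : Nat) : Int) 1).map
        (fun i => PySem.List.pyGetD coeffs i []) := by
      have := PySem.List.map_pyGetD_pyRange_zero coeffs []
      rw [PySem.List.len_eq] at this
      exact this.symm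
    calc (PySem.List.combinations (PySem.List.pyRange 0 ((coeffs.length : Nat) : Int) 1) K).map _
        = ((PySem.List.combinations (PySem.List.pyRange 0 ((coeffs.length : Nat) : Int) 1) K).map
            (List.map (fun i => PySem.List.pyGetD coeffs i []))).map
            (fun rc => rc.foldl (fun pat r => (PySem.List.pyRange 0 ((N : Nat) : Int) 1).foldl (fun pat j =>
                PySem.List.pySetD pat j
                  (PySem.List.pyGetD pat j 0 + PySem.List.pyGetD r j 0)) pat)
              (List.replicate N (0 : Int))) := by
          rw [List.map_map]
          apply List.map_congr_left
          intro c _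
          simp only [Function.comp, List.foldl_map]
      _ = (PySem.List.combinations coeffs K).map
            (fun rc => rc.foldl (fun pat r => (PySem.List.pyRange 0 ((N : Nat) : Int) 1).foldl (fun pat j =>
                PySem.List.pySetD pat j
                  (PySem.List.pyGetD pat j 0 + PySem.List.pyGetD r j 0)) pat)
              (List.replicate N (0 : Int))) := by
          rw [← PySem.List.combinations_map]
          rw [← hco]
      _ = (PySem.List.combinations coeffs K).map
            (fun rc => rc.foldl (fun p r => List.zipWith (· + ·) p r) (List.replicate N (0 : Int))) := by
          apply List.map_congr_left
          intro rc hrc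
          exact foldA_eq_zip N rc _ (by simp)
            (fun r hr => hlen r ((PySem.List.sublist_of_mem_combinations hrc).mem hr))
      _ = Lv coeffs K (List.replicate N 0) := combs_map_eq coeffs K _
  have hf : (dfsB coeffs 0 (List.replicate N (0 : Int))).filter (fun pj => pj.2 == (K : Int))
      = (Lv coeffs K (List.replicate N 0)).map (fun p => (p, (K : Int))) := by
    have h0 : ((K : Int)) = 0 + (K : Int) := by omega
    rw [h0]
    exact dfsB_filter_eq coeffs 0 K _
  calc (PySem.List.combinations (PySem.List.pyRange 0 ((coeffs.length : Nat) : Int) 1) ((K : Int)).toNat).foldl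
          (fun out combo =>
            out.modify
              ((combo.foldl (fun pat i => (PySem.List.pyRange 0 ((N : Nat) : Int) 1).foldl (fun pat j =>
                  PySem.List.pySetD pat j
                    (PySem.List.pyGetD pat j 0 + PySem.List.pyGetD (PySem.List.pyGetD coeffs i []) j 0)) pat)
                (List.replicate N (0 : Int))).map (fun x => PySem.Int.mod x 2))
              PySem.Dict.empty
              (fun d => d.setdefault (combo.foldl (fun pat i => (PySem.List.pyRange 0 ((N : Nat) : Int) 1).foldl (fun pat j =>
                  PySem.List.pySetD pat j
                    (PySem.List.pyGetD pat j 0 + PySem.List.pyGetD (PySem.List.pyGetD coeffs i []) j 0)) pat)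
                (List.replicate N (0 : Int))) (K : Int))) out
      = (Lv coeffs K (List.replicate N 0)).foldl
          (fun out p => out.modify (p.map (fun x => PySem.Int.mod x 2)) PySem.Dict.empty
            (fun d => d.setdefault p (K : Int))) out := by
        rw [Int.toNat_natCast, ← hmapA, List.foldl_map]
    _ = ((Lv coeffs K (List.replicate N 0)).map (fun p => (p, (K : Int)))).foldl
          (fun out pj => out.modify (pj.1.map (fun x => PySem.Int.mod x 2)) PySem.Dict.empty
            (fun d => d.setdefault pj.1 (K : Int))) out := by
        rw [List.foldl_map]
    _ = (dfsB coeffs 0 (List.replicate N (0 : Int))).foldl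
          (fun out pj =>
            if pj.2 == (K : Int) then
              out.modify (pj.1.map (fun x => PySem.Int.mod x 2)) PySem.Dict.empty
                (fun d => d.setdefault pj.1 (K : Int))
            else out) out := by
        rw [PySem.List.foldl_if_eq_foldl_filter, hf]
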